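-- pv_equiv track=rewrite | github.com/oskvaj/advent-of-code | 2025/day10/day10a.py | find_shortest_combo
-- ===== SOURCE A (Python) =====
-- def find_shortest_combo(
--     start: list[int], buttons: list[list[int]], depth: int
-- ) -> list[list[int]]:
--     if depth > 1:
--         returned_results = find_shortest_combo(start, buttons, depth - 1)
--         results = []
--         for result in returned_results:
--             for button in buttons:
--                 temp = result.copy()
--                 for digit in button:
--                     temp[digit] = (temp[digit] + 1) % 2
--                 results.append(temp)
--         return results
--     else:
--         results = []
--         for button in buttons:
--             temp = start.copy()
--             for digit in button:
--                 temp[digit] = (temp[digit] + 1) % 2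
--             results.append(temp)
--         return results
-- ===== SOURCE B (Python) =====
-- def find_shortest_combo(
--     start: list[int], buttons: list[list[int]], depth: int
-- ) -> list[list[int]]:
--     def press(r, button):
--         temp = r.copy()
--         for digit in button:
--             temp[digit] = (temp[digit] + 1) % 2
--         return temp
--
--     current = [start]
--     for _ in range(max(depth, 1)):
--         current = [press(r, button) for r in current for button in buttons]
--     return current
-- ===== Notes on version B (the rewrite author's own statement) =====
-- stated objective: alternative
-- what changed: Replaces the depth-wise recursion by a bottom-up loop: start from [start] and apply one 'press every button on every result' expansion max(depth,1) times, building each generation as a flat comprehension.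
import Mathlib
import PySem

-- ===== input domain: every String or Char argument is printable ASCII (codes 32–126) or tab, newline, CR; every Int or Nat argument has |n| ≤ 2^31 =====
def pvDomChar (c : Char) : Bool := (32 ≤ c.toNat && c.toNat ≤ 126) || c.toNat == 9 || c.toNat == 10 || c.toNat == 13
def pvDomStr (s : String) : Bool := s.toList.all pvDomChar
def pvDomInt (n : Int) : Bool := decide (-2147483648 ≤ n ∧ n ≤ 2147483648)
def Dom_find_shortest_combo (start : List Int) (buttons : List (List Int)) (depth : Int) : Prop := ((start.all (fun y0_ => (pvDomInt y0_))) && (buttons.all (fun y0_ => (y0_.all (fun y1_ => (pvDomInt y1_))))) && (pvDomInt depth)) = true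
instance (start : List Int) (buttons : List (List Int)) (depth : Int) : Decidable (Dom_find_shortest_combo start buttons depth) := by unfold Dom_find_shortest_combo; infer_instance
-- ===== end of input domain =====

-- B replaces A's depth-wise recursion by a bottom-up loop applying one button-press
-- expansion max(depth,1) times (objective: alternative decomposition, same cost).

-- ===== PORT A =====
def find_shortest_combo (start : List Int) (buttons : List (List Int)) (depth : Int) : List (List Int) :=
  if _h : depth > 1 then
    let returned_results := find_shortest_combo start buttons (depth - 1)
    returned_results.foldl (fun results result =>
      buttons.foldl (fun results button =>
        results ++ [button.foldl (fun temp digit =>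
          PySem.List.pySetD temp digit (PySem.Int.mod (PySem.List.pyGetD temp digit 0 + 1) 2)) result]) results) []
  else
    buttons.foldl (fun results button =>
      results ++ [button.foldl (fun temp digit =>
        PySem.List.pySetD temp digit (PySem.Int.mod (PySem.List.pyGetD temp digit 0 + 1) 2)) start]) []
termination_by depth.toNat
decreasing_by omega

-- ===== PORT B =====
-- helper 'press' of Source B
def pvPress (r button : List Int) : List Int :=
  button.foldl (fun temp digit =>
    PySem.List.pySetD temp digit (PySem.Int.mod (PySem.List.pyGetD temp digit 0 + 1) 2)) r

def find_shortest_combo_alt (start : List Int) (buttons : List (List Int)) (depth : Int) : List (List Int) :=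
  (List.range (max depth 1).toNat).foldl
    (fun current _ => current.flatMap (fun r => buttons.map (fun button => pvPress r button)))
    [start]

-- ===== PRECONDITION & SPEC =====
-- Pre_ excludes exactly the inputs where Python A raises IndexError: a button digit outside -len(start) … len(start)-1.
def Pre_find_shortest_combo (start : List Int) (buttons : List (List Int)) (depth : Int) : Prop :=
  ∀ b ∈ buttons, ∀ d ∈ b, PySem.Raise.InRange start.length d
instance (start : List Int) (buttons : List (List Int)) (depth : Int) : Decidable (Pre_find_shortest_combo start buttons depth) := by unfold Pre_find_shortest_combo; infer_instance
def pvWitness_find_shortest_combo : List Int × List (List Int) × Int := ([0, 1], [[0], [1]], 2)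

def Spec_find_shortest_combo (start : List Int) (buttons : List (List Int)) (depth : Int) (out : List (List Int)) : Prop := out = find_shortest_combo_alt start buttons depth
instance (start : List Int) (buttons : List (List Int)) (depth : Int) (out : List (List Int)) : Decidable (Spec_find_shortest_combo start buttons depth out) := by unfold Spec_find_shortest_combo; infer_instance

-- ===== CLAIM (what is proved, stated in full; the proofs are below) =====
def Claim_equal_find_shortest_combo : Prop := ∀ (start : List Int) (buttons : List (List Int)) (depth : Int), Dom_find_shortest_combo start buttons depth → Pre_find_shortest_combo start buttons depth → Spec_find_shortest_combo start buttons depth (find_shortest_combo start buttons depth)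

-- ===== LEMMAS AND PROOFS =====

-- one generation of A's double loop is one flatMap/map expansion step
theorem pv_loopA (buttons : List (List Int)) (rr acc : List (List Int)) :
    rr.foldl (fun results result =>
      buttons.foldl (fun results button =>
        results ++ [button.foldl (fun temp digit =>
          PySem.List.pySetD temp digit (PySem.Int.mod (PySem.List.pyGetD temp digit 0 + 1) 2)) result]) results) acc
    = acc ++ rr.flatMap (fun r => buttons.map (fun button => pvPress r button)) := by
  induction rr generalizing acc with
  | nil => simp
  | cons r rs ih =>
    simp only [List.foldl_cons, List.flatMap_cons, ih]
    rw [PySem.List.foldl_append_singleton_eq_map]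
    simp [pvPress]

theorem pv_alt_succ (start : List Int) (buttons : List (List Int)) (n : Nat) :
    (List.range (n + 1)).foldl
      (fun current _ => current.flatMap (fun r => buttons.map (fun button => pvPress r button))) [start]
    = ((List.range n).foldl
      (fun current _ => current.flatMap (fun r => buttons.map (fun button => pvPress r button))) [start]).flatMap
        (fun r => buttons.map (fun button => pvPress r button)) := by
  rw [List.range_succ, List.foldl_append]
  rfl

theorem pv_main (n : Nat) : ∀ (start : List Int) (buttons : List (List Int)) (depth : Int),
    depth.toNat = n →
    find_shortest_combo start buttons depth = find_shortest_combo_alt start buttons depth := by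
  induction n with
  | zero =>
    intro start buttons depth h
    have hle : ¬ depth > 1 := by omega
    have hmax : (max depth 1).toNat = 1 := by omega
    rw [find_shortest_combo]
    simp only [hle, dite_false, find_shortest_combo_alt, hmax]
    rw [PySem.List.foldl_append_singleton_eq_map]
    simp [pvPress]
  | succ k ih =>
    intro start buttons depth h
    by_cases hgt : depth > 1
    · rw [find_shortest_combo]
      simp only [hgt, dite_true]
      rw [pv_loopA, List.nil_append, ih start buttons (depth - 1) (by omega)]
      have hmax : (max depth 1).toNat = (max (depth - 1) 1).toNat + 1 := by omega
      rw [find_shortest_combo_alt, find_shortest_combo_alt, hmax, pv_alt_succ]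
    · have hmax : (max depth 1).toNat = 1 := by omega
      rw [find_shortest_combo]
      simp only [hgt, dite_false, find_shortest_combo_alt, hmax]
      rw [PySem.List.foldl_append_singleton_eq_map]
      simp [pvPress]

-- ===== VERDICT (by name: the statement is the Claim_ definition above) =====
theorem find_shortest_combo_spec : Claim_equal_find_shortest_combo := by
  intro start buttons depth _ _
  unfold Spec_find_shortest_combo
  exact pv_main depth.toNat start buttons depth rfl
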